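-- pv_equiv track=rewrite | github.com/CXJJYSH/My-Code | 算法/力扣/灵神/讲解/基础算法精讲/02 双指针/03 题单/01 单序列双指针/02 相向双指针/01 基础/04 2 2105. 给植物浇水 II.py | minimumRefill
-- ===== SOURCE A (Python) =====
-- from typing import List
--
-- def minimumRefill(plants: List[int], capacityA: int, capacityB: int) -> int:
--
--     # 看了灵神的题解，从这种简单的写法中学到了严谨简洁的逻辑思维，即这道题中先装水再立即浇水，而且判断语句只需要判断要不要装水，而不需要进行指针移动。要分清每一段代码负责什么功能。
--
--     ans = 0
--     n = len(plants)
--     a, b = capacityA, capacityB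
--     i, j = 0, n - 1
--     while i < j:
--         if a < plants[i]:
--             a = capacityA
--             ans += 1
--         a -= plants[i]
--         i += 1
--         if b < plants[j]:
--             b = capacityB
--             ans += 1
--         b -= plants[j]
--         j -= 1
--     if i ==j and max(a, b) < plants[i]:
--         ans += 1
--     return ans
-- ===== SOURCE B (Python) =====
-- from typing import List
--
-- def _refills(seq: List[int], cap: int):
--     # Prefix-sum formulation: a refill happens exactly when the running sum
--     # exceeds the moving threshold base + cap; 'base' is the prefix sum at the
--     # last refill point.  Returns (refill count, leftover water).
--     s = 0
--     base = 0
--     cnt = 0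
--     for p in seq:
--         s += p
--         if s - base > cap:
--             base = s - p
--             cnt += 1
--     return cnt, cap - (s - base)
--
-- def minimumRefill(plants: List[int], capacityA: int, capacityB: int) -> int:
--     n = len(plants)
--     mid = n // 2
--     ca, la = _refills(plants[:mid], capacityA)
--     cb, lb = _refills(plants[n - mid:][::-1], capacityB)
--     ans = ca + cb
--     if n % 2 == 1 and max(la, lb) < plants[mid]:
--         ans += 1
--     return ans
-- ===== Notes on version B (the rewrite author's own statement) =====
-- stated objective: alternative
-- what changed: Replaces A's interleaved two-pointer simulation of a water level (refill-then-subtract per plant) by a prefix-sum formulation: each half is handled by a pass over running prefix sums that counts crossings of a moving threshold base+cap (base = prefix sum at the last refill), with the leftover water recovered as cap-(s-base) for the separate middle-plant check.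
import Mathlib
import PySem

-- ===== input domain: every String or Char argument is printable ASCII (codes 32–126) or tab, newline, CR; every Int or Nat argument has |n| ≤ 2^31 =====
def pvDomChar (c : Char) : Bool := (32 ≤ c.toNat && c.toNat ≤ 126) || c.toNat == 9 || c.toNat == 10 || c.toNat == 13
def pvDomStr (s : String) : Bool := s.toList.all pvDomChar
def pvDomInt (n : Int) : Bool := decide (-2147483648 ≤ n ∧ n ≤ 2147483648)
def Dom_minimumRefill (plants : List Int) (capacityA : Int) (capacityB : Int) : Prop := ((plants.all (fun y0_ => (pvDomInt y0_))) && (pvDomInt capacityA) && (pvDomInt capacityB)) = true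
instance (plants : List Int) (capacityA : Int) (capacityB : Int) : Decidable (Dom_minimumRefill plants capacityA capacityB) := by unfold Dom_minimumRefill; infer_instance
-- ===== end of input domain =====

-- B replaces A's interleaved two-pointer water-level simulation by a prefix-sum
-- pass per half that counts crossings of a moving threshold (objective: alternative).

-- ===== PORT A =====
-- A's 'while i < j' loop over the state (ans, a, b, i, j); the trailing
-- 'if i == j and max(a, b) < plants[i]' check is the loop's exit branch.
def minimumRefillLoop (plants : List Int) (capacityA capacityB : Int)
    (ans a b i j : Int) : Int :=
  if h : i < j then
    let pi := PySem.List.pyGetD plants i 0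
    let a1 := if a < pi then capacityA else a
    let ans1 := if a < pi then ans + 1 else ans
    let a2 := a1 - pi
    let pj := PySem.List.pyGetD plants j 0
    let b1 := if b < pj then capacityB else b
    let ans2 := if b < pj then ans1 + 1 else ans1
    let b2 := b1 - pj
    minimumRefillLoop plants capacityA capacityB ans2 a2 b2 (i + 1) (j - 1)
  else
    if i = j ∧ max a b < PySem.List.pyGetD plants i 0 then ans + 1 else ans
termination_by (j - i).toNat
decreasing_by omega

def minimumRefill (plants : List Int) (capacityA : Int) (capacityB : Int) : Int :=
  minimumRefillLoop plants capacityA capacityB 0 capacityA capacityB 0 ((plants.length : Int) - 1)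

-- ===== PORT B =====
-- one step of _refills' loop: state (s, base, cnt); s is the running prefix sum
def pvRefStep (cap : Int) (st : Int × Int × Int) (p : Int) : Int × Int × Int :=
  let s := st.1 + p
  if s - st.2.1 > cap then (s, s - p, st.2.2 + 1) else (s, st.2.1, st.2.2)

-- _refills(seq, cap): returns (refill count, leftover water cap - (s - base))
def pvRefills (seq : List Int) (cap : Int) : Int × Int :=
  let f := seq.foldl (pvRefStep cap) (0, 0, 0)
  (f.2.2, cap - (f.1 - f.2.1))

def minimumRefill_alt (plants : List Int) (capacityA : Int) (capacityB : Int) : Int :=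
  let n : Int := plants.length
  let mid := PySem.Int.floordiv n 2
  let ra := pvRefills (PySem.List.slice plants none (some mid)) capacityA
  let rb := pvRefills ((PySem.List.slice plants (some (n - mid)) none).reverse) capacityB
  let ans := ra.1 + rb.1
  if PySem.Int.mod n 2 = 1 ∧ max ra.2 rb.2 < PySem.List.pyGetD plants mid 0 then ans + 1 else ans

-- ===== PRECONDITION & SPEC =====
def Spec_minimumRefill (plants : List Int) (capacityA : Int) (capacityB : Int) (out : Int) : Prop := out = minimumRefill_alt plants capacityA capacityB
instance (plants : List Int) (capacityA : Int) (capacityB : Int) (out : Int) : Decidable (Spec_minimumRefill plants capacityA capacityB out) := by unfold Spec_minimumRefill; infer_instance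

-- ===== CLAIM (what is proved, stated in full; the proofs are below) =====
def Claim_equal_minimumRefill : Prop := ∀ (plants : List Int) (capacityA : Int) (capacityB : Int), Dom_minimumRefill plants capacityA capacityB → Spec_minimumRefill plants capacityA capacityB (minimumRefill plants capacityA capacityB)

-- ===== LEMMAS AND PROOFS =====

-- proof-only abstraction of A's per-plant update of one side's (water, count)
def pvWater (cap : Int) (s : Int × Int) (p : Int) : Int × Int :=
  if s.1 < p then (cap - p, s.2 + 1) else (s.1 - p, s.2)

-- the refill counter is carried additively through a pvWater fold
lemma pvWater_shift (cap : Int) : ∀ (l : List Int) (w k t : Int),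
    l.foldl (pvWater cap) (w, k + t) =
      ((l.foldl (pvWater cap) (w, k)).1, (l.foldl (pvWater cap) (w, k)).2 + t) := by
  intro l
  induction l with
  | nil => intro w k t; simp
  | cons p l ih =>
    intro w k t
    simp only [List.foldl_cons]
    by_cases hw : w < p
    · simpa [pvWater, hw, add_right_comm k t 1] using ih (cap - p) (k + 1) t
    · simpa [pvWater, hw] using ih (w - p) k t

-- bridge: the water-level fold is the prefix-sum fold read through
-- water = cap - (s - base), count = cnt
lemma pvWater_eq_ref (cap : Int) : ∀ (l : List Int) (s base cnt : Int),
    l.foldl (pvWater cap) (cap - (s - base), cnt) =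
      (cap - ((l.foldl (pvRefStep cap) (s, base, cnt)).1
               - (l.foldl (pvRefStep cap) (s, base, cnt)).2.1),
       (l.foldl (pvRefStep cap) (s, base, cnt)).2.2) := by
  intro l
  induction l with
  | nil => intro s base cnt; simp
  | cons p l ih =>
    intro s base cnt
    simp only [List.foldl_cons]
    have hcond : (cap - (s - base) < p) ↔ (s + p - base > cap) := by omega
    by_cases h : s + p - base > cap
    · have h1 : cap - (s - base) < p := hcond.mpr h
      have e1 : pvWater cap (cap - (s - base), cnt) p = (cap - ((s + p) - s), cnt + 1) := by
        simp only [pvWater, if_pos h1]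
        congr 1
        omega
      have e2 : pvRefStep cap (s, base, cnt) p = (s + p, s + p - p, cnt + 1) := by
        simp [pvRefStep, h]
      rw [e1, e2]
      have : s + p - p = s := by omega
      rw [this]
      exact ih (s + p) s (cnt + 1)
    · have h1 : ¬ (cap - (s - base) < p) := fun hh => h (hcond.mp hh)
      have e1 : pvWater cap (cap - (s - base), cnt) p = (cap - ((s + p) - base), cnt) := by
        simp only [pvWater, if_neg h1]
        congr 1
        omega
      have e2 : pvRefStep cap (s, base, cnt) p = (s + p, base, cnt) := by
        simp [pvRefStep, h]
      rw [e1, e2]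
      exact ih (s + p) base cnt

-- A's interleaved loop, characterised as: forward pass over the next m front
-- plants, backward pass over the last m plants up to j, then the middle check.
lemma loop_eq (plants : List Int) (cA cB : Int) :
    ∀ (m : Nat) (i j a b ans : Int), 0 ≤ i → j < (plants.length : Int) →
      (j + 1 - i = 2 * m ∨ j + 1 - i = 2 * m + 1) →
      minimumRefillLoop plants cA cB ans a b i j =
        (let fa := ((plants.drop i.toNat).take m).foldl (pvWater cA) (a, ans)
         let fb := (((plants.drop (j.toNat + 1 - m)).take m).reverse).foldl (pvWater cB) (b, fa.2)
         if j + 1 - i = 2 * (m : Int) + 1 ∧ max fa.1 fb.1 < PySem.List.pyGetD plants (i + m) 0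
         then fb.2 + 1 else fb.2) := by
  intro m
  induction m with
  | zero =>
    intro i j a b ans hi hj hpar
    rw [minimumRefillLoop]
    rw [dif_neg (by omega)]
    simp only [List.take_zero, List.foldl_nil, List.reverse_nil, Nat.cast_zero, mul_zero, zero_add, add_zero]
    have hiff : (i = j) ↔ (j + 1 - i = 1) := by omega
    by_cases hm : max a b < PySem.List.pyGetD plants i 0
    · by_cases hij : i = j
      · rw [if_pos ⟨hij, hm⟩, if_pos ⟨by omega, hm⟩]
      · rw [if_neg (by tauto), if_neg (by rw [not_and]; intro h; exact absurd (hiff.mpr h) hij)]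
    · rw [if_neg (by tauto), if_neg (by tauto)]
  | succ m ih =>
    intro i j a b ans hi hj hpar
    have hij : i < j := by omega
    have hiN : i.toNat < plants.length := by omega
    have hjN : j.toNat < plants.length := by omega
    have hmj : m ≤ j.toNat := by omega
    have hpi := PySem.List.pyGetD_eq_getElem (xs := plants) (i := i) (d := 0) hi (by omega)
    have hpj := PySem.List.pyGetD_eq_getElem (xs := plants) (i := j) (d := 0) (by omega) (by omega)
    rw [minimumRefillLoop]
    rw [dif_pos hij]
    simp only []
    rw [ih (i + 1) (j - 1) _ _ _ (by omega) (by omega) (by omega)]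
    simp only []
    -- front segment: plants[i] :: (next m)
    have hfront : (plants.drop i.toNat).take (m + 1)
        = plants[i.toNat] :: ((plants.drop (i + 1).toNat).take m) := by
      have hi1 : (i + 1).toNat = i.toNat + 1 := by omega
      rw [hi1, List.drop_eq_getElem_cons hiN, List.take_succ_cons]
    -- back segment: (previous m) ++ [plants[j]]
    have hback : (plants.drop (j.toNat + 1 - (m + 1))).take (m + 1)
        = ((plants.drop ((j - 1).toNat + 1 - m)).take m) ++ [plants[j.toNat]] := by
      have h1 : j.toNat + 1 - (m + 1) = j.toNat - m := by omega
      have h2 : (j - 1).toNat + 1 - m = j.toNat - m := by omega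
      rw [h1, h2, List.take_add_one]
      congr 1
      have : (plants.drop (j.toNat - m))[m]? = plants[j.toNat - m + m]? := List.getElem?_drop ..
      rw [this]
      have h3 : j.toNat - m + m = j.toNat := by omega
      rw [h3, List.getElem?_eq_getElem hjN]
      rfl
    rw [hfront, hback, List.reverse_append, List.reverse_singleton]
    simp only [List.foldl_cons, List.singleton_append]
    -- name the pieces
    set pi := plants[i.toNat] with hpidef
    set pj := plants[j.toNat] with hpjdef
    rw [hpi, hpj]
    -- A's forward update of (a, ans) is one pvWater step with counter offset δb
    set δb : Int := if b < pj then 1 else 0 with hδ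
    have hstepA : ((if b < pj then (if a < pi then ans + 1 else ans) + 1 else (if a < pi then ans + 1 else ans)))
        = (pvWater cA (a, ans) pi).2 + δb := by
      by_cases ha : a < pi <;> by_cases hb : b < pj <;> simp [pvWater, ha, hb, hδ]
    have hstepA1 : ((if a < pi then cA else a) - pi) = (pvWater cA (a, ans) pi).1 := by
      by_cases ha : a < pi <;> simp [pvWater, ha]
    rw [hstepA, hstepA1]
    set l := (plants.drop (i + 1).toNat).take m with hl
    rw [pvWater_shift]
    set fa := l.foldl (pvWater cA) (pvWater cA (a, ans) pi) with hfa
    -- A's backward update of b is one pvWater step; its counter lands after the forward fold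
    have hstepB : pvWater cB (b, fa.2) pj = ((if b < pj then cB else b) - pj, fa.2 + δb) := by
      by_cases hb : b < pj <;> simp [pvWater, hb, hδ]
    rw [hstepB]
    simp only [show i + 1 + (m : Int) = i + ((m : Int) + 1) from by ring,
      show ((j - 1 + 1 - (i + 1) = 2 * (m : Int) + 1)) = ((j + 1 - i = 2 * ((m : Int) + 1) + 1)) from propext (by omega),
      Nat.cast_add, Nat.cast_one]

-- a pvWater fold started at full capacity with counter 0 is pvRefills, swapped
lemma fold_eq_refills (cap : Int) (l : List Int) :
    l.foldl (pvWater cap) (cap, 0) = ((pvRefills l cap).2, (pvRefills l cap).1) := by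
  have h := pvWater_eq_ref cap l 0 0 0
  simpa [pvRefills] using h

-- ===== VERDICT (by name: the statement is the Claim_ definition above) =====
theorem minimumRefill_spec : Claim_equal_minimumRefill := by
  intro plants cA cB _
  unfold Spec_minimumRefill minimumRefill minimumRefill_alt
  set N := plants.length with hN
  have hmid : PySem.Int.floordiv (N : Int) 2 = ((N / 2 : Nat) : Int) := by
    exact_mod_cast PySem.Int.floordiv_natCast N 2
  rcases Nat.eq_zero_or_pos N with h0 | hpos
  · have hnil : plants = [] := List.eq_nil_of_length_eq_zero h0
    subst hnil
    rw [minimumRefillLoop]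
    norm_num [PySem.Int.floordiv, PySem.Int.mod, PySem.List.slice, pvRefills]
  · have hpar : ((N : Int) - 1) + 1 - 0 = 2 * ((N / 2 : Nat) : Int) ∨
        ((N : Int) - 1) + 1 - 0 = 2 * ((N / 2 : Nat) : Int) + 1 := by omega
    rw [loop_eq plants cA cB (N / 2) 0 ((N : Int) - 1) cA cB 0 le_rfl (by omega) hpar]
    have hjN : (((N : Int) - 1)).toNat = N - 1 := by omega
    have hseg : N - 1 + 1 - N / 2 = N - N / 2 := by omega
    have hsub : ((N : Int) - ((N / 2 : Nat) : Int)) = ((N - N / 2 : Nat) : Int) := by omega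
    have hmod : PySem.Int.mod (N : Int) 2 = ((N % 2 : Nat) : Int) := by
      exact_mod_cast PySem.Int.mod_natCast N 2
    have hcondeq : (((N : Int) - 1 + 1 - 0 = 2 * ((N / 2 : Nat) : Int) + 1)) = (PySem.Int.mod (N : Int) 2 = 1) := by
      apply propext
      rw [hmod]
      constructor <;> intro h <;> omega
    have htake : (plants.drop (N - N / 2)).take (N / 2) = plants.drop (N - N / 2) := by
      apply List.take_of_length_le
      rw [List.length_drop, ← hN]
      omega
    simp only [Int.toNat_zero, List.drop_zero, zero_add, hjN, hseg, hmid, hsub,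
      PySem.List.slice_to_natCast, PySem.List.slice_from_natCast, htake, hcondeq]
    set front := plants.take (N / 2) with hfr
    set back := (plants.drop (N - N / 2)).reverse with hbk
    rw [fold_eq_refills cA front]
    rw [show ((pvRefills front cA).1 : Int) = 0 + (pvRefills front cA).1 from by ring,
        pvWater_shift cB back cB 0 (pvRefills front cA).1]
    rw [fold_eq_refills cB back]
    simp only []
    split_ifs <;> ring
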